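-- pv_equiv track=rewrite | github.com/JohnBohnam/Mamonandia | research/bot_with_exercised_trades.py | get_fit_price
-- ===== SOURCE A (Python) =====
-- from typing import List, Dict
--
-- def get_traded_volume(buy_orders: Dict[int, int], sell_orders: Dict[int, int], price):
--     buy_volume = 0
--     for bid_price, volume in buy_orders.items():
--         if bid_price >= price:
--             buy_volume += volume
--     sell_volume = 0
--     for ask_price, volume in sell_orders.items():
--         if ask_price <= price:
--             sell_volume += volume
--     return min(buy_volume, sell_volume)
--
-- def get_fit_price(buy_orders: Dict[int, int], sell_orders: Dict[int, int]):
--     if not buy_orders or not sell_orders: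
--         return None
--
--     min_bid = min(buy_orders.keys())
--     max_ask = max(sell_orders.keys())
--
--     best_fit_price = None
--     best_fit = 0
--     for price in range(min_bid, max_ask):
--         curr_fit = get_traded_volume(buy_orders, sell_orders, price)
--         if curr_fit > best_fit:
--             best_fit = curr_fit
--             best_fit_price = price
--     return best_fit_price
-- ===== SOURCE B (Python) =====
-- def get_fit_price(buy_orders, sell_orders):
--     if not buy_orders or not sell_orders:
--         return None
--     min_bid = min(buy_orders)
--     max_ask = max(sell_orders)
--     breakpoints = set([min_bid] + [k + 1 for k in buy_orders] + list(sell_orders))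
--     best_price, best_fit = None, 0
--     for p in sorted(c for c in breakpoints if min_bid <= c < max_ask):
--         fit = min(sum(v for k, v in buy_orders.items() if k >= p),
--                   sum(v for k, v in sell_orders.items() if k <= p))
--         if fit > best_fit:
--             best_price, best_fit = p, fit
--     return best_price
-- ===== Notes on version B (the rewrite author's own statement) =====
-- stated objective: faster
-- what changed: Instead of evaluating the matched-volume objective at every integer price in [min_bid, max_ask), B evaluates it only at the sorted distinct breakpoint prices (min_bid, each bid price + 1, each ask price), where the step-function fit can change, keeping the earliest strict maximum.
import Mathlib
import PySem

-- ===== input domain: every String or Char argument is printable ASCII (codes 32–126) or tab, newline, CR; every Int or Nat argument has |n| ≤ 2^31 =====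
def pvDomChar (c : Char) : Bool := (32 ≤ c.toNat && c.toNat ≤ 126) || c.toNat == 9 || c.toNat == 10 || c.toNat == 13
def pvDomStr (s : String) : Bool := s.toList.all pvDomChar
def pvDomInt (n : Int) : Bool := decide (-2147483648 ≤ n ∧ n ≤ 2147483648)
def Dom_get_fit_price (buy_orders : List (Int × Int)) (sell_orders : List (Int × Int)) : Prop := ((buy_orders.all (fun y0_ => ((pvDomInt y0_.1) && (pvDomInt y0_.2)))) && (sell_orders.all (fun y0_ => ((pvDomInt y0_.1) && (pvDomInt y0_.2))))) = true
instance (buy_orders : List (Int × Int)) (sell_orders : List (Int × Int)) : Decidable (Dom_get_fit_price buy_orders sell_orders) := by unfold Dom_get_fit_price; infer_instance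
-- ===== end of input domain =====

-- B evaluates the matched-volume objective only at its O(n) breakpoint prices (sorted distinct) instead of every integer price in [min_bid, max_ask): an asymptotically smaller candidate set, same result.


-- ===== PORT A =====
def get_traded_volume (buy_orders : List (Int × Int)) (sell_orders : List (Int × Int)) (price : Int) : Int :=
  let buy_volume := buy_orders.foldl (fun acc kv => if kv.1 ≥ price then acc + kv.2 else acc) 0
  let sell_volume := sell_orders.foldl (fun acc kv => if kv.1 ≤ price then acc + kv.2 else acc) 0
  min buy_volume sell_volume

def get_fit_price (buy_orders : List (Int × Int)) (sell_orders : List (Int × Int)) : Option Int :=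
  if buy_orders = [] ∨ sell_orders = [] then none
  else
    match PySem.List.min? (buy_orders.map Prod.fst) (fun x => x),
          PySem.List.max? (sell_orders.map Prod.fst) (fun x => x) with
    | some min_bid, some max_ask =>
        ((PySem.List.pyRange min_bid max_ask 1).foldl
          (fun s price =>
            let curr_fit := get_traded_volume buy_orders sell_orders price
            if curr_fit > s.2 then (some price, curr_fit) else s)
          ((none : Option Int), (0 : Int))).1
    | _, _ => none

-- ===== PORT B =====
-- sum(v for k, v in … if k >= p) / (… if k <= p), then min — the fit at one candidate price
def pvFit (buy_orders : List (Int × Int)) (sell_orders : List (Int × Int)) (p : Int) : Int :=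
  min ((buy_orders.filter (fun kv => decide (kv.1 ≥ p))).map Prod.snd).sum
      ((sell_orders.filter (fun kv => decide (kv.1 ≤ p))).map Prod.snd).sum

def get_fit_price_alt (buy_orders : List (Int × Int)) (sell_orders : List (Int × Int)) : Option Int :=
  if buy_orders = [] ∨ sell_orders = [] then none
  else
    match PySem.List.min? (buy_orders.map Prod.fst) (fun x => x) with
    | none => none
    | some min_bid =>
      match PySem.List.max? (sell_orders.map Prod.fst) (fun x => x) with
      | none => none
      | some max_ask =>
        let breakpoints : PySem.Set Int :=
          PySem.Set.ofList ([min_bid] ++ buy_orders.map (fun kv => kv.1 + 1) ++ sell_orders.map Prod.fst)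
        let cands := PySem.List.sorted
          (breakpoints.filter (fun c => decide (min_bid ≤ c) && decide (c < max_ask))) (fun x => x) false
        (cands.foldl
          (fun s p =>
            let fit := pvFit buy_orders sell_orders p
            if fit > s.2 then (some p, fit) else s)
          ((none : Option Int), (0 : Int))).1

-- ===== PRECONDITION & SPEC =====
def Spec_get_fit_price (buy_orders : List (Int × Int)) (sell_orders : List (Int × Int)) (out : Option Int) : Prop := out = get_fit_price_alt buy_orders sell_orders
instance (buy_orders : List (Int × Int)) (sell_orders : List (Int × Int)) (out : Option Int) : Decidable (Spec_get_fit_price buy_orders sell_orders out) := by unfold Spec_get_fit_price; infer_instance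

-- ===== CLAIM (what is proved, stated in full; the proofs are below) =====
def Claim_equal_get_fit_price : Prop := ∀ (buy_orders : List (Int × Int)) (sell_orders : List (Int × Int)), Dom_get_fit_price buy_orders sell_orders → Spec_get_fit_price buy_orders sell_orders (get_fit_price buy_orders sell_orders)

-- ===== LEMMAS AND PROOFS =====

-- the breakpoint test: p is min_bid, one past a bid price, or an ask price
def pvCand (buy_orders : List (Int × Int)) (sell_orders : List (Int × Int)) (m : Int) (c : Int) : Bool :=
  c == m || buy_orders.any (fun kv => kv.1 + 1 == c) || sell_orders.any (fun kv => kv.1 == c)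

-- B's fit function is A's get_traded_volume
theorem pvFit_eq (buy sell : List (Int × Int)) (p : Int) :
    pvFit buy sell p = get_traded_volume buy sell p := by
  unfold pvFit get_traded_volume
  rw [PySem.List.foldl_ite_eq_foldl_filter (p := fun kv : Int × Int => kv.1 ≥ p),
      PySem.List.foldl_ite_eq_foldl_filter (p := fun kv : Int × Int => kv.1 ≤ p),
      PySem.List.foldl_add (g := Prod.snd), PySem.List.foldl_add (g := Prod.snd)]
  simp

-- the fit is constant between consecutive breakpoints
theorem pvFit_const (buy sell : List (Int × Int)) (m q p : Int) (hqp : q ≤ p)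
    (h : ∀ c, q < c → c ≤ p → pvCand buy sell m c = false) :
    get_traded_volume buy sell p = get_traded_volume buy sell q := by
  unfold get_traded_volume
  dsimp only
  have hb : ∀ kv : Int × Int, kv ∈ buy → ((kv.1 ≥ p) ↔ (kv.1 ≥ q)) := by
    intro kv hkv
    constructor
    · intro hp; omega
    · intro hq
      by_contra hp
      have hc := h (kv.1 + 1) (by omega) (by omega)
      simp [pvCand] at hc
      exact absurd rfl (hc.1.2 kv.1 kv.2 hkv)
  have hs : ∀ kv : Int × Int, kv ∈ sell → ((kv.1 ≤ p) ↔ (kv.1 ≤ q)) := by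
    intro kv hkv
    constructor
    · intro hp
      by_contra hq
      have hc := h kv.1 (by omega) (by omega)
      simp [pvCand] at hc
      exact absurd rfl (hc.2 kv.1 kv.2 hkv)
    · intro hq; omega
  have e1 : buy.foldl (fun acc kv => if kv.1 ≥ p then acc + kv.2 else acc) 0
      = buy.foldl (fun acc kv => if kv.1 ≥ q then acc + kv.2 else acc) 0 :=
    by apply PySem.List.foldl_congr_mem; intro acc kv hkv; simp [hb kv hkv]
  have e2 : sell.foldl (fun acc kv => if kv.1 ≤ p then acc + kv.2 else acc) 0
      = sell.foldl (fun acc kv => if kv.1 ≤ q then acc + kv.2 else acc) 0 :=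
    by apply PySem.List.foldl_congr_mem; intro acc kv hkv; simp [hs kv hkv]
  rw [e1, e2]

-- scanning the whole range with the best-so-far update equals scanning only the breakpoints
theorem pvFoldFilter (F : Int → Int) (cand : Int → Bool) (b : Int)
    (hconst : ∀ q p, q ≤ p → (∀ c, q < c → c ≤ p → cand c = false) → F p = F q) :
    ∀ (n : Nat) (a : Int) (s : Option Int × Int), (b - a).toNat ≤ n →
    (∀ p, a ≤ p → p < b → (∀ c, a ≤ c → c ≤ p → cand c = false) → F p ≤ s.2) →
    ((PySem.List.pyRange a b 1).foldl (fun s price => if F price > s.2 then (some price, F price) else s) s)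
      = (((PySem.List.pyRange a b 1).filter cand).foldl (fun s price => if F price > s.2 then (some price, F price) else s) s) := by
  intro n
  induction n with
  | zero =>
    intro a s hn _
    rw [PySem.List.pyRange_one_eq_nil (by omega)]
    simp
  | succ n ih =>
    intro a s hn hinv
    by_cases hab : a < b
    · rw [PySem.List.pyRange_one_cons hab, List.filter_cons]
      by_cases hc : cand a = true
      · simp only [hc, reduceIte, List.foldl_cons]
        apply ih (a + 1) _ (by omega)
        intro p hap hpb hnone
        have hFp : F p = F a := hconst a p (by omega) (by
          intro c hac hcp
          exact hnone c (by omega) hcp)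
        by_cases hgt : F a > s.2
        · simp only [if_pos hgt]; omega
        · simp only [if_neg hgt]; omega
      · have hfa : cand a = false := by simpa using hc
        have hFa : F a ≤ s.2 := hinv a le_rfl hab (by
          intro c hac hca
          have hce : c = a := by omega
          exact hce ▸ hfa)
        have hstep : (if F a > s.2 then ((some a : Option Int), F a) else s) = s := by
          rw [if_neg (by omega)]
        simp only [hfa, Bool.false_eq_true, reduceIte, List.foldl_cons, hstep]
        apply ih (a + 1) s (by omega)
        intro p hap hpb hnone
        apply hinv p (by omega) hpb
        intro c hac hcp
        by_cases hca : c = a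
        · exact hca ▸ hfa
        · exact hnone c (by omega) hcp
    · rw [PySem.List.pyRange_one_eq_nil (by omega)]
      simp

-- B's candidate list is exactly the breakpoints of the scanned range, in increasing order
theorem pvCands_eq (buy sell : List (Int × Int)) (m M : Int) :
    PySem.List.sorted
      ((PySem.Set.ofList ([m] ++ buy.map (fun kv => kv.1 + 1) ++ sell.map Prod.fst)).filter
        (fun c => decide (m ≤ c) && decide (c < M))) (fun x => x) false
      = (PySem.List.pyRange m M 1).filter (pvCand buy sell m) := by
  apply PySem.List.sorted_eq_of_perm_of_pairwise_lt
  · rw [List.perm_ext_iff_of_nodup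
      ((PySem.List.nodup_pyRange_one m M).filter _)
      ((PySem.Set.nodup_ofList _).filter _)]
    intro c
    simp only [List.mem_filter, PySem.List.mem_pyRange_one, PySem.Set.mem_ofList,
      List.mem_append, List.mem_singleton, List.mem_map, pvCand, Bool.or_eq_true,
      List.any_eq_true, beq_iff_eq, Bool.and_eq_true, decide_eq_true_eq]
    exact and_comm
  · exact (PySem.List.pairwise_lt_pyRange_one m M).filter _

-- ===== VERDICT (by name: the statement is the Claim_ definition above) =====
theorem get_fit_price_spec : Claim_equal_get_fit_price := by
  intro buy sell _
  unfold Spec_get_fit_price get_fit_price get_fit_price_alt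
  by_cases hemp : buy = [] ∨ sell = []
  · simp [hemp]
  · simp only [if_neg hemp]
    cases hmin : PySem.List.min? (buy.map Prod.fst) (fun x => x) with
    | none => rfl
    | some m =>
      cases hmax : PySem.List.max? (sell.map Prod.fst) (fun x => x) with
      | none => rfl
      | some M =>
        dsimp only
        simp only [pvFit_eq]
        rw [pvCands_eq]
        congr 1
        exact pvFoldFilter (get_traded_volume buy sell) (pvCand buy sell m) M
          (fun q p hqp h => pvFit_const buy sell m q p hqp h)
          (M - m).toNat m ((none : Option Int), (0 : Int)) le_rfl
          (by
            intro p hmp _ hnone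
            exfalso
            have := hnone m le_rfl hmp
            simp [pvCand] at this)
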